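-- pv_equiv track=rewrite | github.com/JadenKim-dev/algorithm-study | boj/어항_정리/index.py | mapping_magic1
-- ===== SOURCE A (Python) =====
-- from math import sqrt, floor
--
-- INF = int(1e9); NULL = -1
--
-- dr = [-1, 0, 1, 0]
--
-- dc = [0, 1, 0, -1]
--
-- def mapping_magic1(N):
--     bowl_to_arr_map = [NULL]*N
--     n = floor(sqrt(N))
--     dist = [n-1]
--     for i in range(2*n-1, 1, -1):
--         dist.append(i//2)
--
--     if n**2 <= N < n**2 + n:
--         for i in range(N-1, -1, -1):
--             if i >= n**2:
--                 bowl_to_arr_map[i] = (n-1, n+i-n**2)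
--             elif i == n**2 - 1:
--                 now, dist_idx = 1, 0
--                 r, c, d = n-1, n-1, 3
--                 bowl_to_arr_map[i] = (r, c)
--             else:
--                 r, c = r+dr[d], c+dc[d]
--                 bowl_to_arr_map[i] = (r, c)
--                 now += 1
--                 if now > dist[dist_idx]:
--                     now = 1
--                     dist_idx += 1
--                     d = (d+1)%4
--     elif N >= n**2 + n:
--         for i in range(N-1, -1, -1):
--             if i >= n**2:
--                 bowl_to_arr_map[i] = (n, i-n**2)
--             elif i == n**2 - 1:
--                 now, dist_idx = 1, 0
--                 r, c = n-1, 0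
--                 d = 0
--                 bowl_to_arr_map[i] = (r, c)
--             else:
--                 r, c = r+dr[d], c+dc[d]
--                 bowl_to_arr_map[i] = (r, c)
--                 now += 1
--                 if now > dist[dist_idx]:
--                     now = 1
--                     dist_idx += 1
--                     d = (d+1)%4
--
--     return bowl_to_arr_map
-- ===== SOURCE B (Python) =====
-- from math import sqrt, floor
--
-- def mapping_magic1(N):
--     n = floor(sqrt(N))
--     bl = N >= n * n + n   # True: spiral starts at the bottom-left corner, else bottom-right
--     path = []             # spiral, outside-in, one ring (four range comprehensions) per iteration
--     a = b = 0
--     m = n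
--     while m > 0:
--         if m == 1:
--             path.append((a, b))
--             break
--         if bl:
--             path += ([(r, b) for r in range(a + m - 1, a - 1, -1)]
--                      + [(a, c) for c in range(b + 1, b + m)]
--                      + [(r, b + m - 1) for r in range(a + 1, a + m)]
--                      + [(a + m - 1, c) for c in range(b + m - 2, b, -1)])
--         else:
--             path += ([(a + m - 1, c) for c in range(b + m - 1, b - 1, -1)]
--                      + [(r, b) for r in range(a + m - 2, a - 1, -1)]
--                      + [(a, c) for c in range(b + 1, b + m)]
--                      + [(r, b + m - 1) for r in range(a + 1, a + m - 1)])
--         a += 1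
--         b += 1
--         m -= 2
--     path.reverse()
--     if bl:
--         return path + [(n, j) for j in range(N - n * n)]
--     return path + [(n - 1, n + j) for j in range(N - n * n)]
-- ===== Notes on version B (the rewrite author's own statement) =====
-- stated objective: alternative
-- what changed: A fills a preallocated array backwards with a direction-vector state machine (now/dist_idx segment countdowns deciding each turn of a simulated walk); B builds the spiral by ring decomposition - four range comprehensions per ring, shrinking into the inner square - reverses the path once and appends the tail row, with no direction vectors, counters or per-cell branching.
import Mathlib
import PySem

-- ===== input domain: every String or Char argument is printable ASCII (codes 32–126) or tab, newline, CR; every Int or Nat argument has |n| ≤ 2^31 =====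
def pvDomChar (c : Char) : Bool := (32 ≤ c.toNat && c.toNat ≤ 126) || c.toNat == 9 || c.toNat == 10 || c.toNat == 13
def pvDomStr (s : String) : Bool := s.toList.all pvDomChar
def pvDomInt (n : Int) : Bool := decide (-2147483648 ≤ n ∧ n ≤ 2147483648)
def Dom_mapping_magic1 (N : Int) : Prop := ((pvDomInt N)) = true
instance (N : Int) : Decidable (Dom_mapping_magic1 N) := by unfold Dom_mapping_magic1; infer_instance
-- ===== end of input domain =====

-- B replaces A's direction-vector state machine (per-index segment countdown deciding each turn)
-- by a per-ring construction: each ring of the spiral is four range comprehensions, shrinking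
-- into the inner square (objective: alternative).

-- ===== PORT A =====
-- NULL = -1 is Python's placeholder in the result list; for N ≥ 0 every slot is overwritten
-- before the function returns, so the pair chosen here never appears in the output.
def pvNULL : Int × Int := (-1, -1)
-- module-level dr / dc
def drA : List Int := [-1, 0, 1, 0]
def dcA : List Int := [0, 1, 0, -1]

-- loop body of A's first branch (n² ≤ N < n² + n); state = (bowl_to_arr_map, now, dist_idx, r, c, d)
def bodyA1 (n : Int) (dist : List Int) (st : List (Int × Int) × Int × Int × Int × Int × Int) (i : Int) :
    List (Int × Int) × Int × Int × Int × Int × Int :=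
  let (bowl, now, distIdx, r, c, d) := st
  if i ≥ n ^ 2 then
    (PySem.List.pySetD bowl i (n - 1, n + i - n ^ 2), now, distIdx, r, c, d)
  else if i = n ^ 2 - 1 then
    (PySem.List.pySetD bowl i (n - 1, n - 1), 1, 0, n - 1, n - 1, 3)
  else
    let r := r + PySem.List.pyGetD drA d 0
    let c := c + PySem.List.pyGetD dcA d 0
    let bowl := PySem.List.pySetD bowl i (r, c)
    let now := now + 1
    if now > PySem.List.pyGetD dist distIdx 0 then
      (bowl, 1, distIdx + 1, r, c, PySem.Int.mod (d + 1) 4)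
    else
      (bowl, now, distIdx, r, c, d)

-- loop body of A's second branch (N ≥ n² + n); same state
def bodyA2 (n : Int) (dist : List Int) (st : List (Int × Int) × Int × Int × Int × Int × Int) (i : Int) :
    List (Int × Int) × Int × Int × Int × Int × Int :=
  let (bowl, now, distIdx, r, c, d) := st
  if i ≥ n ^ 2 then
    (PySem.List.pySetD bowl i (n, i - n ^ 2), now, distIdx, r, c, d)
  else if i = n ^ 2 - 1 then
    (PySem.List.pySetD bowl i (n - 1, 0), 1, 0, n - 1, 0, 0)
  else
    let r := r + PySem.List.pyGetD drA d 0
    let c := c + PySem.List.pyGetD dcA d 0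
    let bowl := PySem.List.pySetD bowl i (r, c)
    let now := now + 1
    if now > PySem.List.pyGetD dist distIdx 0 then
      (bowl, 1, distIdx + 1, r, c, PySem.Int.mod (d + 1) 4)
    else
      (bowl, now, distIdx, r, c, d)

-- floor(sqrt(N)) is ported as integer sqrt: exact on 0 ≤ N ≤ 2^31, where double sqrt is
-- correctly rounded and floor(sqrt(N)) coincides with isqrt(N).
-- now/dist_idx/r/c/d are unassigned in Python until the i = n²-1 iteration (which precedes
-- any read of them); the 0 placeholders in the initial fold state are inert.
def mapping_magic1 (N : Int) : List (Int × Int) :=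
  let bowl : List (Int × Int) := List.replicate N.toNat pvNULL   -- [NULL]*N
  let n : Int := Int.sqrt N
  let dist : List Int :=
    (PySem.List.pyRange (2 * n - 1) 1 (-1)).foldl (fun acc i => acc ++ [PySem.Int.floordiv i 2]) [n - 1]
  if n ^ 2 ≤ N ∧ N < n ^ 2 + n then
    ((PySem.List.pyRange (N - 1) (-1) (-1)).foldl (bodyA1 n dist) (bowl, 0, 0, 0, 0, 0)).1
  else if N ≥ n ^ 2 + n then
    ((PySem.List.pyRange (N - 1) (-1) (-1)).foldl (bodyA2 n dist) (bowl, 0, 0, 0, 0, 0)).1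
  else
    bowl

-- ===== PORT B =====
-- body of B's while loop: one ring per iteration, four range comprehensions per ring
-- (bl: spiral starts at the bottom-left corner and first goes up, else bottom-right going left)
def ringsLoop (bl : Bool) (path : List (Int × Int)) (a b m : Int) : List (Int × Int) :=
  if _hm : m ≤ 0 then path
  else if m = 1 then path ++ [(a, b)]
  else
    ringsLoop bl
      (path ++
        (if bl then
          ((PySem.List.pyRange (a + m - 1) (a - 1) (-1)).map (fun r => (r, b)))
            ++ ((PySem.List.pyRange (b + 1) (b + m) 1).map (fun c => (a, c)))
            ++ ((PySem.List.pyRange (a + 1) (a + m) 1).map (fun r => (r, b + m - 1)))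
            ++ ((PySem.List.pyRange (b + m - 2) b (-1)).map (fun c => (a + m - 1, c)))
        else
          ((PySem.List.pyRange (b + m - 1) (b - 1) (-1)).map (fun c => (a + m - 1, c)))
            ++ ((PySem.List.pyRange (a + m - 2) (a - 1) (-1)).map (fun r => (r, b)))
            ++ ((PySem.List.pyRange (b + 1) (b + m) 1).map (fun c => (a, c)))
            ++ ((PySem.List.pyRange (a + 1) (a + m - 1) 1).map (fun r => (r, b + m - 1)))))
      (a + 1) (b + 1) (m - 2)
termination_by m.toNat
decreasing_by omega

def mapping_magic1_alt (N : Int) : List (Int × Int) :=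
  let n : Int := Int.sqrt N   -- floor(sqrt(N)), exact integer sqrt here as in A's port
  let bl : Bool := decide (N ≥ n * n + n)
  let path := ringsLoop bl [] 0 0 n
  path.reverse ++
    (if bl then (PySem.List.pyRange 0 (N - n * n) 1).map (fun j => (n, j))
     else (PySem.List.pyRange 0 (N - n * n) 1).map (fun j => (n - 1, n + j)))

-- ===== PRECONDITION & SPEC =====
-- Pre_ excludes exactly the negative inputs, where Python A raises ValueError (math.sqrt of a negative number).
def Pre_mapping_magic1 (N : Int) : Prop := 0 ≤ N
instance (N : Int) : Decidable (Pre_mapping_magic1 N) := by unfold Pre_mapping_magic1; infer_instance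
def pvWitness_mapping_magic1 : Int := (7)

def Spec_mapping_magic1 (N : Int) (out : List (Int × Int)) : Prop := out = mapping_magic1_alt N
instance (N : Int) (out : List (Int × Int)) : Decidable (Spec_mapping_magic1 N out) := by
  unfold Spec_mapping_magic1; infer_instance

-- ===== CLAIM (what is proved, stated in full; the proofs are below) =====
def Claim_equal_mapping_magic1 : Prop :=
  ∀ (N : Int), Dom_mapping_magic1 N → Pre_mapping_magic1 N → Spec_mapping_magic1 N (mapping_magic1 N)

-- ===== LEMMAS AND PROOFS =====

-- inward clockwise spiral starting at the bottom-left corner (a+m-1, b), first leg upward;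
-- one ring per recursion level, each leg a range comprehension
def ringsBL (a b m : Int) : List (Int × Int) :=
  if _hm : m ≤ 0 then []
  else if m = 1 then [(a, b)]
  else
    (((PySem.List.pyRange (a + m - 1) (a - 1) (-1)).map (fun r => (r, b)))
      ++ ((PySem.List.pyRange (b + 1) (b + m) 1).map (fun c => (a, c)))
      ++ ((PySem.List.pyRange (a + 1) (a + m) 1).map (fun r => (r, b + m - 1)))
      ++ ((PySem.List.pyRange (b + m - 2) b (-1)).map (fun c => (a + m - 1, c))))
    ++ ringsBL (a + 1) (b + 1) (m - 2)
termination_by m.toNat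
decreasing_by omega

-- inward clockwise spiral starting at the bottom-right corner (a+m-1, b+m-1), first leg leftward
def ringsBR (a b m : Int) : List (Int × Int) :=
  if _hm : m ≤ 0 then []
  else if m = 1 then [(a, b)]
  else
    (((PySem.List.pyRange (b + m - 1) (b - 1) (-1)).map (fun c => (a + m - 1, c)))
      ++ ((PySem.List.pyRange (a + m - 2) (a - 1) (-1)).map (fun r => (r, b)))
      ++ ((PySem.List.pyRange (b + 1) (b + m) 1).map (fun c => (a, c)))
      ++ ((PySem.List.pyRange (a + 1) (a + m - 1) 1).map (fun r => (r, b + m - 1))))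
    ++ ringsBR (a + 1) (b + 1) (m - 2)
termination_by m.toNat
decreasing_by omega

-- the accumulator loop is the recursive ring construction
lemma ringsLoop_BL : ∀ (mN : Nat) (m : Int), m.toNat = mN → ∀ (acc : List (Int × Int)) (a b : Int),
    ringsLoop true acc a b m = acc ++ ringsBL a b m := by
  intro mN
  induction mN using Nat.strong_induction_on with
  | _ mN ih =>
    intro m hm acc a b
    rw [ringsLoop, ringsBL]
    by_cases h0 : m ≤ 0
    · simp [h0]
    by_cases h1 : m = 1
    · simp [h1]
    · simp only [dif_neg h0, if_neg h1]
      rw [if_pos trivial]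
      rw [ih (m - 2).toNat (by omega) (m - 2) rfl]
      simp [List.append_assoc]

lemma ringsLoop_BR : ∀ (mN : Nat) (m : Int), m.toNat = mN → ∀ (acc : List (Int × Int)) (a b : Int),
    ringsLoop false acc a b m = acc ++ ringsBR a b m := by
  intro mN
  induction mN using Nat.strong_induction_on with
  | _ mN ih =>
    intro m hm acc a b
    rw [ringsLoop, ringsBR]
    by_cases h0 : m ≤ 0
    · simp [h0]
    by_cases h1 : m = 1
    · simp [h1]
    · simp only [dif_neg h0, if_neg h1]
      rw [if_neg (by simp)]
      rw [ih (m - 2).toNat (by omega) (m - 2) rfl]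
      simp [List.append_assoc]

-- direction deltas as functions
def drv (d : Int) : Int := PySem.List.pyGetD drA d 0
def dcv (d : Int) : Int := PySem.List.pyGetD dcA d 0

-- one 'else'-branch step of A's state machine: emitted cell and next (now, dist_idx, r, c, d)
def stepA (D : List Int) (s : Int × Int × Int × Int × Int) :
    (Int × Int) × (Int × Int × Int × Int × Int) :=
  let (now, idx, r, c, d) := s
  let r' := r + drv d
  let c' := c + dcv d
  if now + 1 > PySem.List.pyGetD D idx 0 then
    ((r', c'), (1, idx + 1, r', c', PySem.Int.mod (d + 1) 4))
  else
    ((r', c'), (now + 1, idx, r', c', d))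

-- the cells A's machine emits over k steps, in emission order
def traceA (D : List Int) : Nat → (Int × Int × Int × Int × Int) → List (Int × Int)
  | 0, _ => []
  | k + 1, s => (stepA D s).1 :: traceA D k (stepA D s).2

-- one straight segment of t cells starting one step beyond (r, c) in direction d
def runSeg : Nat → Int → Int → Int → List (Int × Int)
  | 0, _, _, _ => []
  | t + 1, r, c, d => (r + drv d, c + dcv d) :: runSeg t (r + drv d) (c + dcv d) d

-- the whole spiral path: one segment per entry, turning right after each
def runsS : List Int → Int → Int → Int → List (Int × Int)
  | [], _, _, _ => []
  | L :: S, r, c, d =>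
      runSeg L.toNat r c d ++
        runsS S (r + (L.toNat : Int) * drv d) (c + (L.toNat : Int) * dcv d) (PySem.Int.mod (d + 1) 4)

-- the tail cells tailf(m), tailf(m+1), …, tailf(m+k-1)
def tseq (tailf : Int → Int × Int) (m : Nat) : Nat → List (Int × Int)
  | 0 => []
  | k + 1 => tseq tailf m k ++ [tailf ((m : Int) + k)]

-- [k, k, k-1, k-1, …, 1, 1] — the segment lengths after the first
def desc : Nat → List Int
  | 0 => []
  | k + 1 => ((k : Int) + 1) :: ((k : Int) + 1) :: desc k

lemma run_lemma (D : List Int) (j L : Int) (hget : PySem.List.pyGetD D j 0 = L) :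
    ∀ (t : Nat) (rest : Nat) (r c d : Int), 1 ≤ t → (t : Int) ≤ L →
      traceA D (t + rest) (L - t + 1, j, r, c, d) =
        runSeg t r c d ++
          traceA D rest (1, j + 1, r + t * drv d, c + t * dcv d, PySem.Int.mod (d + 1) 4) := by
  intro t
  induction t with
  | zero => intro rest r c d h1; omega
  | succ t ih =>
      intro rest r c d _ hle
      by_cases ht : t = 0
      · subst ht
        have hstate : L - (1 : Nat) + 1 = L := by push_cast; ring
        show traceA D (1 + rest) _ = _
        rw [show (1 + rest) = rest + 1 from by omega]
        simp only [traceA, stepA, hstate]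
        rw [if_pos (by rw [hget]; omega)]
        have e1 : r + ((1:Nat):Int) * drv d = r + drv d := by push_cast; ring
        have e2 : c + ((1:Nat):Int) * dcv d = c + dcv d := by push_cast; ring
        rw [e1, e2]
        simp [runSeg]
      · have ht1 : 1 ≤ t := by omega
        have hlt : ¬ (L - (t + 1 : Nat) + 1 + 1 > PySem.List.pyGetD D j 0) := by
          rw [hget]; push_cast; omega
        show traceA D (t + 1 + rest) _ = _
        rw [show (t + 1 + rest) = (t + rest) + 1 from by omega]
        simp only [traceA, stepA]
        rw [if_neg hlt]
        have hstate : L - ((t + 1 : Nat) : Int) + 1 + 1 = L - (t : Nat) + 1 := by push_cast; ring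
        simp only [hstate]
        rw [ih rest (r + drv d) (c + dcv d) d ht1 (by push_cast at hle ⊢; omega)]
        have a1 : r + drv d + (t : Int) * drv d = r + ((t + 1 : Nat) : Int) * drv d := by
          push_cast; ring
        have a2 : c + dcv d + (t : Int) * dcv d = c + ((t + 1 : Nat) : Int) * dcv d := by
          push_cast; ring
        rw [a1, a2]
        simp only [runSeg, List.cons_append]

lemma trace_eq_runs (D : List Int) :
    ∀ (segs : List Int) (j : Nat) (r c d : Int),
      D.drop j = segs → (∀ L ∈ segs, 1 ≤ L) →
      traceA D ((segs.map Int.toNat).sum) (1, (j : Int), r, c, d) = runsS segs r c d := by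
  intro segs
  induction segs with
  | nil => intro j r c d _ _; simp [traceA, runsS]
  | cons L S ih =>
      intro j r c d hdrop hpos
      have hL1 : 1 ≤ L := hpos L (by simp)
      have hjlt : j < D.length := by
        by_contra h
        rw [List.drop_eq_nil_of_le (by omega)] at hdrop
        exact (List.cons_ne_nil L S) hdrop.symm
      have hget : PySem.List.pyGetD D (j : Int) 0 = L := by
        have h0 : D[j]? = some L := by
          have h := congrArg (fun l : List Int => l[0]?) hdrop
          simpa using h
        rw [PySem.List.pyGetD_natCast]
        simp [List.getD, h0]
      have hsum : ((L :: S).map Int.toNat).sum = L.toNat + (S.map Int.toNat).sum := by simp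
      rw [hsum]
      have hrun := run_lemma D (j : Int) L hget L.toNat ((S.map Int.toNat).sum) r c d
        (by omega) (by omega)
      rw [show L - (L.toNat : Int) + 1 = 1 from by omega] at hrun
      rw [hrun]
      have hdrop' : D.drop (j + 1) = S := by
        have : D.drop (j + 1) = (D.drop j).drop 1 := by
          rw [List.drop_drop]
        rw [this, hdrop]; rfl
      have ihj := ih (j + 1) (r + (L.toNat : Int) * drv d) (c + (L.toNat : Int) * dcv d)
        (PySem.Int.mod (d + 1) 4) hdrop' (fun x hx => hpos x (by simp [hx]))
      rw [show ((j : Int) + 1) = ((j + 1 : Nat) : Int) from by push_cast; ring, ihj]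
      rfl

lemma drv0 : drv 0 = -1 := by decide

lemma drv1 : drv 1 = 0 := by decide

lemma drv2 : drv 2 = 1 := by decide

lemma drv3 : drv 3 = 0 := by decide

lemma dcv0 : dcv 0 = 0 := by decide

lemma dcv1 : dcv 1 = 1 := by decide

lemma dcv2 : dcv 2 = 0 := by decide

lemma dcv3 : dcv 3 = -1 := by decide

lemma runSeg_up (t : Nat) : ∀ (r c : Int),
    runSeg t r c 0 = (PySem.List.pyRange (r - 1) (r - 1 - t) (-1)).map (fun x => (x, c)) := by
  induction t with
  | zero =>
      intro r c
      rw [show (r - 1 - ((0 : Nat) : Int)) = r - 1 from by push_cast; ring,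
        PySem.List.pyRange_neg_one_eq_nil (le_refl _)]
      rfl
  | succ t ih =>
      intro r c
      rw [PySem.List.pyRange_neg_one_cons (by push_cast; omega)]
      simp only [runSeg, drv0, dcv0, List.map_cons]
      rw [show r + -1 = r - 1 from by ring, show c + 0 = c from by ring, ih]
      rw [show r - 1 - 1 - (t : Int) = r - 1 - ((t + 1 : Nat) : Int) from by push_cast; ring]

lemma runSeg_right (t : Nat) : ∀ (r c : Int),
    runSeg t r c 1 = (PySem.List.pyRange (c + 1) (c + 1 + t) 1).map (fun x => (r, x)) := by
  induction t with
  | zero =>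
      intro r c
      rw [show (c + 1 + ((0 : Nat) : Int)) = c + 1 from by push_cast; ring,
        PySem.List.pyRange_one_eq_nil (le_refl _)]
      rfl
  | succ t ih =>
      intro r c
      rw [PySem.List.pyRange_one_cons (by push_cast; omega)]
      simp only [runSeg, drv1, dcv1, List.map_cons]
      rw [show r + 0 = r from by ring, ih]
      rw [show c + 1 + 1 + (t : Int) = c + 1 + ((t + 1 : Nat) : Int) from by push_cast; ring]

lemma runSeg_down (t : Nat) : ∀ (r c : Int),
    runSeg t r c 2 = (PySem.List.pyRange (r + 1) (r + 1 + t) 1).map (fun x => (x, c)) := by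
  induction t with
  | zero =>
      intro r c
      rw [show (r + 1 + ((0 : Nat) : Int)) = r + 1 from by push_cast; ring,
        PySem.List.pyRange_one_eq_nil (le_refl _)]
      rfl
  | succ t ih =>
      intro r c
      rw [PySem.List.pyRange_one_cons (by push_cast; omega)]
      simp only [runSeg, drv2, dcv2, List.map_cons]
      rw [show c + 0 = c from by ring, ih]
      rw [show r + 1 + 1 + (t : Int) = r + 1 + ((t + 1 : Nat) : Int) from by push_cast; ring]

lemma runSeg_left (t : Nat) : ∀ (r c : Int),
    runSeg t r c 3 = (PySem.List.pyRange (c - 1) (c - 1 - t) (-1)).map (fun x => (r, x)) := by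
  induction t with
  | zero =>
      intro r c
      rw [show (c - 1 - ((0 : Nat) : Int)) = c - 1 from by push_cast; ring,
        PySem.List.pyRange_neg_one_eq_nil (le_refl _)]
      rfl
  | succ t ih =>
      intro r c
      rw [PySem.List.pyRange_neg_one_cons (by push_cast; omega)]
      simp only [runSeg, drv3, dcv3, List.map_cons]
      rw [show r + 0 = r from by ring, show c + -1 = c - 1 from by ring, ih]
      rw [show c - 1 - 1 - (t : Int) = c - 1 - ((t + 1 : Nat) : Int) from by push_cast; ring]

lemma runsS_cons_up (L : Int) (S : List Int) (r c : Int) (hL : 0 ≤ L) :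
    runsS (L :: S) r c 0 = runSeg L.toNat r c 0 ++ runsS S (r - L) c 1 := by
  simp only [runsS, drv0, dcv0]
  rw [show r + (L.toNat : Int) * -1 = r - L from by omega,
    show c + (L.toNat : Int) * 0 = c from by ring]
  rfl

lemma runsS_cons_right (L : Int) (S : List Int) (r c : Int) (hL : 0 ≤ L) :
    runsS (L :: S) r c 1 = runSeg L.toNat r c 1 ++ runsS S r (c + L) 2 := by
  simp only [runsS, drv1, dcv1]
  rw [show r + (L.toNat : Int) * 0 = r from by ring,
    show c + (L.toNat : Int) * 1 = c + L from by omega]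
  rfl

lemma runsS_cons_down (L : Int) (S : List Int) (r c : Int) (hL : 0 ≤ L) :
    runsS (L :: S) r c 2 = runSeg L.toNat r c 2 ++ runsS S (r + L) c 3 := by
  simp only [runsS, drv2, dcv2]
  rw [show r + (L.toNat : Int) * 1 = r + L from by omega,
    show c + (L.toNat : Int) * 0 = c from by ring]
  rfl

lemma runsS_cons_left (L : Int) (S : List Int) (r c : Int) (hL : 0 ≤ L) :
    runsS (L :: S) r c 3 = runSeg L.toNat r c 3 ++ runsS S r (c - L) 0 := by
  simp only [runsS, drv3, dcv3]
  rw [show r + (L.toNat : Int) * 0 = r from by ring,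
    show c + (L.toNat : Int) * -1 = c - L from by omega]
  rfl

lemma runsS_peel (L : Int) (S : List Int) (r c d : Int) (hL : 1 ≤ L) :
    runsS (L :: S) r c d =
      (r + drv d, c + dcv d) :: runsS ((L - 1) :: S) (r + drv d) (c + dcv d) d := by
  simp only [runsS]
  rw [show L.toNat = (L - 1).toNat + 1 from by omega]
  simp only [runSeg, List.cons_append]
  have e1 : r + (((L - 1).toNat + 1 : Nat) : Int) * drv d
      = r + drv d + ((L - 1).toNat : Int) * drv d := by push_cast; ring
  have e2 : c + (((L - 1).toNat + 1 : Nat) : Int) * dcv d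
      = c + dcv d + ((L - 1).toNat : Int) * dcv d := by push_cast; ring
  rw [e1, e2]

lemma G_BL : ∀ (m : Nat), 1 ≤ m → ∀ (a b : Int),
    ((a + m - 1, b) :: runsS (((m : Int) - 1) :: desc (m - 1)) (a + m - 1) b 0) =
      ringsBL a b m := by
  intro m
  induction m using Nat.strong_induction_on with
  | _ m ih =>
    intro hm a b
    obtain _ | m' := m
    · exact absurd hm (by omega)
    obtain _ | m'' := m'
    · -- m = 1
      rw [ringsBL]
      norm_num [runsS, runSeg, desc]
    obtain _ | t := m''
    · -- m = 2
      have hc : ((0 + 1 + 1 : Nat) : Int) = 2 := by norm_num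
      rw [hc]
      simp only [desc, Nat.cast_zero]
      rw [show (0 : Int) + 1 = 1 from by ring, show (2 : Int) - 1 = 1 from by ring,
        show a + 2 - 1 = a + 1 from by ring]
      rw [runsS_cons_up 1 _ _ _ (by norm_num), show a + 1 - 1 = a from by ring]
      rw [runsS_cons_right 1 _ _ _ (by norm_num)]
      rw [runsS_cons_down 1 _ _ _ (by norm_num)]
      simp only [runsS]
      rw [show ((1 : Int)).toNat = 1 from rfl]
      rw [runSeg_up, runSeg_right, runSeg_down]
      rw [ringsBL]
      rw [dif_neg (by norm_num), if_neg (by norm_num)]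
      rw [show ringsBL (a + 1) (b + 1) (2 - 2) = [] from by rw [ringsBL]; simp]
      rw [show a + 2 - 1 = a + 1 from by ring, show b + 2 - 2 = b from by ring,
        show b + 2 - 1 = b + 1 from by ring]
      rw [PySem.List.pyRange_neg_one_cons (show a - 1 < a + 1 from by omega)]
      rw [PySem.List.pyRange_neg_one_eq_nil (show b ≤ b from le_refl b)]
      simp only [List.map_cons, List.cons_append, List.append_assoc, List.map_nil,
        List.append_nil]
      rw [show b + 2 = (b + 1) + 1 from by ring, show a + 2 = (a + 1) + 1 from by ring,
        PySem.List.pyRange_one_singleton, PySem.List.pyRange_one_singleton]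
      norm_num
    · -- m = t + 3
      have hc : ((t + 1 + 1 + 1 : Nat) : Int) = (t : Int) + 3 := by push_cast; ring
      rw [hc]
      rw [show a + ((t : Int) + 3) - 1 = a + (t : Int) + 2 from by ring]
      rw [show (t : Int) + 3 - 1 = (t : Int) + 2 from by ring]
      simp only [show t + 1 + 1 + 1 - 1 = t + 2 from rfl, desc]
      rw [show ((t + 1 : Nat) : Int) + 1 = (t : Int) + 2 from by push_cast; ring]
      rw [runsS_cons_up ((t : Int) + 2) _ _ _ (by omega),
        show a + (t : Int) + 2 - ((t : Int) + 2) = a from by ring]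
      rw [runsS_cons_right ((t : Int) + 2) _ _ _ (by omega)]
      rw [runsS_cons_down ((t : Int) + 2) _ _ _ (by omega)]
      rw [runsS_cons_left ((t : Int) + 1) _ _ _ (by omega),
        show b + ((t : Int) + 2) - ((t : Int) + 1) = b + 1 from by ring]
      rw [runsS_peel ((t : Int) + 1) _ _ _ _ (by omega), drv0, dcv0]
      rw [show a + ((t : Int) + 2) + -1 = a + (t : Int) + 1 from by ring,
        show (b : Int) + 1 + 0 = b + 1 from by ring,
        show (t : Int) + 1 - 1 = (t : Int) from by ring]
      have hinner := ih (t + 1) (by omega) (by omega) (a + 1) (b + 1)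
      rw [show a + 1 + ((t + 1 : Nat) : Int) - 1 = a + (t : Int) + 1 from by push_cast; ring,
        show ((t + 1 : Nat) : Int) - 1 = (t : Int) from by push_cast; ring,
        show (t + 1) - 1 = t from rfl] at hinner
      conv_rhs => rw [ringsBL]
      rw [dif_neg (by omega), if_neg (by omega)]
      rw [show (t : Int) + 3 - 2 = ((t + 1 : Nat) : Int) from by push_cast; ring]
      rw [← hinner]
      rw [runSeg_up, runSeg_right, runSeg_down, runSeg_left]
      rw [show ((((t : Int) + 2).toNat : Nat) : Int) = (t : Int) + 2 from by omega,
        show ((((t : Int) + 1).toNat : Nat) : Int) = (t : Int) + 1 from by omega]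
      rw [PySem.List.pyRange_neg_one_cons (show a - 1 < a + ((t : Int) + 3) - 1 from by omega)]
      simp only [List.map_cons, List.cons_append, List.append_assoc]
      ring_nf

lemma G_BR : ∀ (m : Nat), 1 ≤ m → ∀ (a b : Int),
    ((a + m - 1, b + m - 1) :: runsS (((m : Int) - 1) :: desc (m - 1)) (a + m - 1) (b + m - 1) 3) =
      ringsBR a b m := by
  intro m
  induction m using Nat.strong_induction_on with
  | _ m ih =>
    intro hm a b
    obtain _ | m' := m
    · exact absurd hm (by omega)
    obtain _ | m'' := m'
    · -- m = 1
      rw [ringsBR]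
      norm_num [runsS, runSeg, desc]
    obtain _ | t := m''
    · -- m = 2
      have hc : ((0 + 1 + 1 : Nat) : Int) = 2 := by norm_num
      rw [hc]
      simp only [desc, Nat.cast_zero]
      rw [show (0 : Int) + 1 = 1 from by ring, show (2 : Int) - 1 = 1 from by ring,
        show a + 2 - 1 = a + 1 from by ring, show b + 2 - 1 = b + 1 from by ring]
      rw [runsS_cons_left 1 _ _ _ (by norm_num), show b + 1 - 1 = b from by ring]
      rw [runsS_cons_up 1 _ _ _ (by norm_num), show a + 1 - 1 = a from by ring]
      rw [runsS_cons_right 1 _ _ _ (by norm_num)]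
      simp only [runsS]
      rw [show ((1 : Int)).toNat = 1 from rfl]
      rw [runSeg_left, runSeg_up, runSeg_right]
      rw [ringsBR]
      rw [dif_neg (by norm_num), if_neg (by norm_num)]
      rw [show ringsBR (a + 1) (b + 1) (2 - 2) = [] from by rw [ringsBR]; simp]
      rw [show a + 2 - 1 = a + 1 from by ring, show b + 2 - 1 = b + 1 from by ring,
        show a + 2 - 2 = a from by ring]
      rw [PySem.List.pyRange_neg_one_cons (show b - 1 < b + 1 from by omega)]
      rw [PySem.List.pyRange_one_eq_nil (show a + 1 ≤ a + 1 from le_refl _)]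
      simp only [List.map_cons, List.cons_append, List.append_assoc, List.map_nil,
        List.append_nil]
      rw [show b + 2 = (b + 1) + 1 from by ring, PySem.List.pyRange_one_singleton]
      norm_num
    · -- m = t + 3
      have hc : ((t + 1 + 1 + 1 : Nat) : Int) = (t : Int) + 3 := by push_cast; ring
      rw [hc]
      rw [show a + ((t : Int) + 3) - 1 = a + (t : Int) + 2 from by ring,
        show b + ((t : Int) + 3) - 1 = b + (t : Int) + 2 from by ring]
      rw [show (t : Int) + 3 - 1 = (t : Int) + 2 from by ring]
      simp only [show t + 1 + 1 + 1 - 1 = t + 2 from rfl, desc]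
      rw [show ((t + 1 : Nat) : Int) + 1 = (t : Int) + 2 from by push_cast; ring]
      rw [runsS_cons_left ((t : Int) + 2) _ _ _ (by omega),
        show b + (t : Int) + 2 - ((t : Int) + 2) = b from by ring]
      rw [runsS_cons_up ((t : Int) + 2) _ _ _ (by omega),
        show a + (t : Int) + 2 - ((t : Int) + 2) = a from by ring]
      rw [runsS_cons_right ((t : Int) + 2) _ _ _ (by omega)]
      rw [runsS_cons_down ((t : Int) + 1) _ _ _ (by omega)]
      rw [runsS_peel ((t : Int) + 1) _ _ _ _ (by omega), drv3, dcv3]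
      rw [show a + ((t : Int) + 1) + 0 = a + (t : Int) + 1 from by ring,
        show b + ((t : Int) + 2) + -1 = b + (t : Int) + 1 from by ring,
        show (t : Int) + 1 - 1 = (t : Int) from by ring]
      have hinner := ih (t + 1) (by omega) (by omega) (a + 1) (b + 1)
      rw [show a + 1 + ((t + 1 : Nat) : Int) - 1 = a + (t : Int) + 1 from by push_cast; ring,
        show b + 1 + ((t + 1 : Nat) : Int) - 1 = b + (t : Int) + 1 from by push_cast; ring,
        show ((t + 1 : Nat) : Int) - 1 = (t : Int) from by push_cast; ring,
        show (t + 1) - 1 = t from rfl] at hinner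
      conv_rhs => rw [ringsBR]
      rw [dif_neg (by omega), if_neg (by omega)]
      rw [show (t : Int) + 3 - 2 = ((t + 1 : Nat) : Int) from by push_cast; ring]
      rw [← hinner]
      rw [runSeg_left, runSeg_up, runSeg_right, runSeg_down]
      rw [show ((((t : Int) + 2).toNat : Nat) : Int) = (t : Int) + 2 from by omega,
        show ((((t : Int) + 1).toNat : Nat) : Int) = (t : Int) + 1 from by omega]
      rw [PySem.List.pyRange_neg_one_cons (show b - 1 < b + ((t : Int) + 3) - 1 from by omega)]
      simp only [List.map_cons, List.cons_append, List.append_assoc]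
      ring_nf

lemma drop_set (l : List (Int × Int)) (i : Nat) (v : Int × Int) (h : i < l.length) :
    (l.set i v).drop i = v :: l.drop (i + 1) := by
  rw [List.set_eq_take_cons_drop v h]
  rw [List.drop_append_of_le_length (by simp; omega)]
  simp

lemma phase1_gen (body : (List (Int × Int) × Int × Int × Int × Int × Int) → Int →
      (List (Int × Int) × Int × Int × Int × Int × Int))
    (m : Nat) (tailf : Int → Int × Int)
    (hbody : ∀ bowl (st : Int × Int × Int × Int × Int) i, (m : Int) ≤ i →
      body (bowl, st) i = (PySem.List.pySetD bowl i (tailf i), st)) :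
    ∀ (k : Nat) (bowl : List (Int × Int)) (st : Int × Int × Int × Int × Int),
      m + k ≤ bowl.length →
      (PySem.List.pyRange ((m : Int) + k - 1) ((m : Int) - 1) (-1)).foldl body (bowl, st) =
        (bowl.take m ++ tseq tailf m k ++ bowl.drop (m + k), st) := by
  intro k
  induction k with
  | zero =>
      intro bowl st hlen
      rw [show (m : Int) + ((0 : Nat) : Int) - 1 = (m : Int) - 1 from by push_cast; ring,
        PySem.List.pyRange_neg_one_eq_nil (le_refl _)]
      simp [tseq, List.take_append_drop]
  | succ k ih =>
      intro bowl st hlen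
      rw [show (m : Int) + ((k + 1 : Nat) : Int) - 1 = (m : Int) + k from by push_cast; ring,
        PySem.List.pyRange_neg_one_cons (by omega)]
      rw [List.foldl_cons, hbody bowl st ((m : Int) + k) (by omega)]
      rw [PySem.List.pySetD_of_nonneg bowl (tailf ((m : Int) + k)) (by positivity),
        show ((m : Int) + (k : Int)).toNat = m + k from by omega]
      rw [ih (bowl.set (m + k) (tailf ((m : Int) + k))) st (by simp; omega)]
      rw [List.take_set_of_le (by omega),
        drop_set bowl (m + k) _ (by omega)]
      simp only [tseq, List.append_assoc, List.cons_append, List.nil_append]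
      rw [show m + (k + 1) = m + k + 1 from by omega]

lemma phase3_gen (D : List Int)
    (body : (List (Int × Int) × Int × Int × Int × Int × Int) → Int →
      (List (Int × Int) × Int × Int × Int × Int × Int))
    (m : Nat)
    (hbody : ∀ bowl (s : Int × Int × Int × Int × Int) (i : Int), 0 ≤ i → i < (m : Int) - 1 →
      body (bowl, s) i = (PySem.List.pySetD bowl i (stepA D s).1, (stepA D s).2)) :
    ∀ (k : Nat) (bowl : List (Int × Int)) (s : Int × Int × Int × Int × Int),
      (k : Int) ≤ (m : Int) - 1 → k ≤ bowl.length →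
      ((PySem.List.pyRange ((k : Int) - 1) (-1) (-1)).foldl body (bowl, s)).1 =
        (traceA D k s).reverse ++ bowl.drop k := by
  intro k
  induction k with
  | zero =>
      intro bowl s _ _
      rw [show ((0 : Nat) : Int) - 1 = -1 from by norm_num,
        PySem.List.pyRange_neg_one_eq_nil (le_refl _)]
      simp [traceA]
  | succ k ih =>
      intro bowl s hk hlen
      rw [show ((k + 1 : Nat) : Int) - 1 = (k : Int) from by push_cast; ring,
        PySem.List.pyRange_neg_one_cons (by omega)]
      rw [List.foldl_cons, hbody bowl s (k : Int) (by positivity) (by omega)]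
      rw [PySem.List.pySetD_of_nonneg bowl ((stepA D s).1) (by positivity),
        show ((k : Int)).toNat = k from by omega]
      rw [ih (bowl.set k (stepA D s).1) (stepA D s).2 (by omega) (by simp; omega)]
      rw [drop_set bowl k _ (by omega)]
      simp only [traceA, List.reverse_cons, List.append_assoc, List.singleton_append]

lemma pyRange_neg_one_append (a m b : Int) (h1 : m ≤ a) (h2 : b ≤ m) :
    PySem.List.pyRange a b (-1) = PySem.List.pyRange a m (-1) ++ PySem.List.pyRange m b (-1) := by
  rw [PySem.List.pyRange_neg_one_eq_reverse, PySem.List.pyRange_neg_one_eq_reverse,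
    PySem.List.pyRange_neg_one_eq_reverse,
    PySem.List.pyRange_one_append (b + 1) (m + 1) (a + 1) (by omega) (by omega),
    List.reverse_append]

lemma Aloop_eval (D : List Int)
    (body : (List (Int × Int) × Int × Int × Int × Int × Int) → Int →
      (List (Int × Int) × Int × Int × Int × Int × Int))
    (q K : Nat) (hq1 : 1 ≤ q) (tailf : Int → Int × Int) (r0 c0 d0 : Int)
    (hb_tail : ∀ bowl (st : Int × Int × Int × Int × Int) i, (q : Int) ≤ i →
      body (bowl, st) i = (PySem.List.pySetD bowl i (tailf i), st))
    (hb_init : ∀ bowl (st : Int × Int × Int × Int × Int),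
      body (bowl, st) ((q : Int) - 1) =
        (PySem.List.pySetD bowl ((q : Int) - 1) (r0, c0), 1, 0, r0, c0, d0))
    (hb_step : ∀ bowl (s : Int × Int × Int × Int × Int) (i : Int), 0 ≤ i → i < (q : Int) - 1 →
      body (bowl, s) i = (PySem.List.pySetD bowl i (stepA D s).1, (stepA D s).2)) :
    ((PySem.List.pyRange ((q : Int) + K - 1) (-1) (-1)).foldl body
        (List.replicate (q + K) pvNULL, 0, 0, 0, 0, 0)).1 =
      ((r0, c0) :: traceA D (q - 1) (1, 0, r0, c0, d0)).reverse ++ tseq tailf q K := by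
  rw [pyRange_neg_one_append ((q : Int) + K - 1) ((q : Int) - 1) (-1) (by omega) (by omega)]
  rw [List.foldl_append]
  rw [phase1_gen body q tailf hb_tail K (List.replicate (q + K) pvNULL) (0, 0, 0, 0, 0)
    (by simp)]
  rw [List.take_replicate, List.drop_replicate, min_eq_left (by omega), Nat.sub_self]
  simp only [List.replicate_zero, List.append_nil]
  rw [PySem.List.pyRange_neg_one_cons (by omega)]
  rw [List.foldl_cons, hb_init _ _]
  rw [PySem.List.pySetD_of_nonneg _ (r0, c0) (by omega),
    show ((q : Int) - 1).toNat = q - 1 from by omega]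
  rw [show (q : Int) - 1 - 1 = ((q - 1 : Nat) : Int) - 1 from by omega]
  rw [phase3_gen D body q hb_step (q - 1) _ (1, 0, r0, c0, d0) (by omega) (by simp; omega)]
  rw [drop_set _ (q - 1) _ (by simp; omega)]
  rw [show q - 1 + 1 = q from by omega]
  rw [List.drop_append_of_le_length (by simp)]
  simp [List.drop_replicate]
lemma desc_spec (k : Nat) :
    (PySem.List.pyRange (2 * (k : Int) + 1) 1 (-1)).map (fun i => PySem.Int.floordiv i 2) = desc k := by
  induction k with
  | zero =>
      rw [show (2 * ((0 : Nat) : Int) + 1) = 1 from by norm_num,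
        PySem.List.pyRange_neg_one_eq_nil (le_refl 1)]
      rfl
  | succ k ih =>
      have e1 : (2 * ((k + 1 : Nat) : Int) + 1) = (2 * (k : Int) + 1) + 2 := by push_cast; ring
      rw [e1, PySem.List.pyRange_neg_one_cons (by omega),
        show (2 * (k : Int) + 1) + 2 - 1 = (2 * (k : Int) + 1) + 1 from by ring,
        PySem.List.pyRange_neg_one_cons (by omega),
        show (2 * (k : Int) + 1) + 1 - 1 = 2 * (k : Int) + 1 from by ring]
      have h1 : PySem.Int.floordiv ((2 * (k : Int) + 1) + 2) 2 = (k : Int) + 1 := by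
        rw [PySem.Int.floordiv_eq_ediv_of_pos (by omega)]; omega
      have h2 : PySem.Int.floordiv ((2 * (k : Int) + 1) + 1) 2 = (k : Int) + 1 := by
        rw [PySem.Int.floordiv_eq_ediv_of_pos (by omega)]; omega
      simp only [List.map_cons, h1, h2, ih, desc]
lemma dist_spec (n : Int) (hn : 1 ≤ n) :
    (PySem.List.pyRange (2 * n - 1) 1 (-1)).foldl
        (fun acc i => acc ++ [PySem.Int.floordiv i 2]) [n - 1] =
      (n - 1) :: desc (n - 1).toNat := by
  rw [PySem.List.foldl_append_singleton_eq_map]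
  have e : 2 * n - 1 = 2 * ((n - 1).toNat : Int) + 1 := by omega
  rw [e, desc_spec]
  rfl
lemma tseq_eq_map_range (tailf : Int → Int × Int) (m : Nat) (k : Nat) :
    tseq tailf m k = (PySem.List.pyRange 0 (k : Int) 1).map fun j => tailf ((m : Int) + j) := by
  induction k with
  | zero =>
      simp only [Nat.cast_zero, tseq]
      rw [PySem.List.pyRange_one_eq_nil (le_refl 0)]
      rfl
  | succ k ih =>
      rw [show ((k + 1 : Nat) : Int) = (k : Int) + 1 from by push_cast; ring,
        PySem.List.pyRange_one_succ_right (by omega : (0 : Int) ≤ (k : Int))]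
      simp [tseq, ih]

lemma desc_pos (k : Nat) : ∀ L ∈ desc k, 1 ≤ L := by
  induction k with
  | zero => simp [desc]
  | succ k ih =>
      intro L hL
      simp only [desc, List.mem_cons] at hL
      rcases hL with h | h | h
      · omega
      · omega
      · exact ih L h

lemma desc_sum (k : Nat) : ((desc k).map Int.toNat).sum = k * (k + 1) := by
  induction k with
  | zero => rfl
  | succ k ih =>
      simp only [desc, List.map_cons, List.sum_cons, ih]
      have : ((k : Int) + 1).toNat = k + 1 := by omega
      rw [this]; ring

lemma sqrt_lb (N : Int) (h : 0 ≤ N) : Int.sqrt N * Int.sqrt N ≤ N := by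
  unfold Int.sqrt
  have h2 : ((N.toNat.sqrt ^ 2 : Nat) : Int) ≤ ((N.toNat : Nat) : Int) :=
    Int.ofNat_le.mpr (Nat.sqrt_le' N.toNat)
  push_cast at h2
  rw [pow_two, Int.toNat_of_nonneg h] at h2
  exact h2

lemma sqrt_ub (N : Int) (h : 0 ≤ N) : N < (Int.sqrt N + 1) * (Int.sqrt N + 1) := by
  unfold Int.sqrt
  have h2 : ((N.toNat : Nat) : Int) < ((N.toNat.sqrt.succ ^ 2 : Nat) : Int) :=
    Int.ofNat_lt.mpr (Nat.lt_succ_sqrt' N.toNat)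
  push_cast at h2
  rw [pow_two, Int.toNat_of_nonneg h] at h2
  simpa using h2

lemma bodyA2_tail (n : Int) (dist : List Int) (bowl : List (Int × Int))
    (st : Int × Int × Int × Int × Int) (i : Int) (hi : n ^ 2 ≤ i) :
    bodyA2 n dist (bowl, st) i = (PySem.List.pySetD bowl i (n, i - n ^ 2), st) := by
  obtain ⟨now, idx, r, c, d⟩ := st
  simp only [bodyA2]
  rw [if_pos hi]

lemma bodyA2_init (n : Int) (dist : List Int) (bowl : List (Int × Int))
    (st : Int × Int × Int × Int × Int) :
    bodyA2 n dist (bowl, st) (n ^ 2 - 1) =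
      (PySem.List.pySetD bowl (n ^ 2 - 1) (n - 1, 0), 1, 0, n - 1, 0, 0) := by
  obtain ⟨now, idx, r, c, d⟩ := st
  simp only [bodyA2]
  rw [if_neg (by linarith), if_pos trivial]

lemma bodyA2_step (n : Int) (dist : List Int) (bowl : List (Int × Int))
    (s : Int × Int × Int × Int × Int) (i : Int) (_h0 : 0 ≤ i) (hlt : i < n ^ 2 - 1) :
    bodyA2 n dist (bowl, s) i =
      (PySem.List.pySetD bowl i (stepA dist s).1, (stepA dist s).2) := by
  obtain ⟨now, idx, r, c, d⟩ := s
  simp only [bodyA2, stepA, drv, dcv]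
  rw [if_neg (by linarith), if_neg (by linarith)]
  split_ifs <;> rfl

lemma bodyA1_tail (n : Int) (dist : List Int) (bowl : List (Int × Int))
    (st : Int × Int × Int × Int × Int) (i : Int) (hi : n ^ 2 ≤ i) :
    bodyA1 n dist (bowl, st) i = (PySem.List.pySetD bowl i (n - 1, n + i - n ^ 2), st) := by
  obtain ⟨now, idx, r, c, d⟩ := st
  simp only [bodyA1]
  rw [if_pos hi]

lemma bodyA1_init (n : Int) (dist : List Int) (bowl : List (Int × Int))
    (st : Int × Int × Int × Int × Int) :
    bodyA1 n dist (bowl, st) (n ^ 2 - 1) =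
      (PySem.List.pySetD bowl (n ^ 2 - 1) (n - 1, n - 1), 1, 0, n - 1, n - 1, 3) := by
  obtain ⟨now, idx, r, c, d⟩ := st
  simp only [bodyA1]
  rw [if_neg (by linarith), if_pos trivial]

lemma bodyA1_step (n : Int) (dist : List Int) (bowl : List (Int × Int))
    (s : Int × Int × Int × Int × Int) (i : Int) (_h0 : 0 ≤ i) (hlt : i < n ^ 2 - 1) :
    bodyA1 n dist (bowl, s) i =
      (PySem.List.pySetD bowl i (stepA dist s).1, (stepA dist s).2) := by
  obtain ⟨now, idx, r, c, d⟩ := s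
  simp only [bodyA1, stepA, drv, dcv]
  rw [if_neg (by linarith), if_neg (by linarith)]
  split_ifs <;> rfl

-- ===== VERDICT (by name: the statement is the Claim_ definition above) =====
theorem mapping_magic1_spec : Claim_equal_mapping_magic1 := by
  intro N _ hpre
  unfold Spec_mapping_magic1
  have hN0 : (0 : Int) ≤ N := hpre
  set n := Int.sqrt N with hn
  have hn0 : 0 ≤ n := Int.sqrt_nonneg N
  have hlb : n * n ≤ N := sqrt_lb N hN0
  have hub : N < (n + 1) * (n + 1) := sqrt_ub N hN0
  by_cases hN1 : N = 0
  · subst hN1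
    have hs0 : Int.sqrt 0 = 0 := by unfold Int.sqrt; simp
    have hrB : ringsLoop true [] 0 0 0 = [] := by rw [ringsLoop]; norm_num
    have hA : mapping_magic1 0 = [] := by
      simp only [mapping_magic1, hs0]
      norm_num [PySem.List.pyRange_neg_one_eq_nil]
    have hB : mapping_magic1_alt 0 = [] := by
      simp only [mapping_magic1_alt, hs0]
      norm_num [PySem.List.pyRange_one_eq_nil]
      exact hrB
    rw [hA, hB]
  have hn1 : 1 ≤ n := by
    by_contra h
    have h0 : n = 0 := by omega
    rw [h0] at hub
    norm_num at hub
    omega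
  set k : Nat := (n - 1).toNat with hkdef
  have hkn : n = (k : Int) + 1 := by omega
  have hnn1 : (1 : Int) ≤ n * n := by nlinarith
  set q : Nat := (n * n).toNat with hqdef
  have hqi : (q : Int) = n * n := Int.toNat_of_nonneg (by positivity)
  have hq1 : 1 ≤ q := by omega
  set K : Nat := (N - n * n).toNat with hKdef
  have hKi : (K : Int) = N - n * n := Int.toNat_of_nonneg (by linarith)
  have hqnat : q = (k + 1) * (k + 1) := by
    have e : ((q : Nat) : Int) = (((k + 1) * (k + 1) : Nat) : Int) := by
      push_cast; rw [hqi, hkn]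
    exact_mod_cast e
  have hq2 : (q : Int) = n ^ 2 := by rw [pow_two]; omega
  have hNq : N.toNat = q + K := by omega
  have hNr : N - 1 = (q : Int) + (K : Int) - 1 := by omega
  simp only [mapping_magic1, mapping_magic1_alt]
  rw [← hn, dist_spec n hn1, ← hkdef, hNq, hNr]
  -- the machine trace equals the abstract spiral path (both regimes share it)
  have hD' : ((((n - 1) :: desc k).map Int.toNat).sum) = q - 1 := by
    simp only [List.map_cons, List.sum_cons, desc_sum]
    have e : (k + 1) * (k + 1) = k + k * (k + 1) + 1 := by ring
    omega
  have htrace : ∀ (r c d : Int),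
      traceA ((n - 1) :: desc k) (q - 1) (1, 0, r, c, d) =
        runsS ((n - 1) :: desc k) r c d := by
    intro r c d
    rcases Nat.eq_zero_or_pos k with hk0 | hkpos
    · have hq1' : q = 1 := by rw [hqnat, hk0]
      have hne : n - 1 = 0 := by omega
      rw [hq1', hne, hk0]
      simp [traceA, runsS, runSeg, desc]
    · have := trace_eq_runs ((n - 1) :: desc k) ((n - 1) :: desc k) 0 r c d (by simp)
        (by
          intro L hL
          simp only [List.mem_cons] at hL
          rcases hL with h | h
          · omega
          · exact desc_pos k L h)
      rw [hD'] at this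
      simpa using this
  rcases le_or_gt ((n : Int) * n + n) N with h2 | h1
  · -- regime 2: N ≥ n² + n
    rw [if_neg (by
      rintro ⟨_, hx⟩
      rw [pow_two] at hx
      linarith)]
    rw [if_pos (by rw [pow_two]; linarith)]
    rw [Aloop_eval ((n - 1) :: desc k) (bodyA2 n ((n - 1) :: desc k)) q K hq1
      (fun i => (n, i - n ^ 2)) (n - 1) 0 0
      (fun bowl st i hi => bodyA2_tail n _ bowl st i (by omega))
      (fun bowl st => by
        rw [show (q : Int) - 1 = n ^ 2 - 1 from by omega]
        exact bodyA2_init n _ bowl st)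
      (fun bowl s i h0 hlt => bodyA2_step n _ bowl s i h0 (by omega))]
    rw [htrace]
    have hGL := G_BL (k + 1) (by omega) 0 0
    rw [show ((k + 1 : Nat) : Int) = n from by omega] at hGL
    rw [show (0 : Int) + n - 1 = n - 1 from by ring, show (k + 1) - 1 = k from rfl] at hGL
    rw [hGL]
    have hbl : decide (N ≥ n * n + n) = true := decide_eq_true (by linarith)
    rw [hbl, if_pos rfl, ringsLoop_BL n.toNat n rfl [] 0 0, List.nil_append]
    rw [tseq_eq_map_range, hKi]
    have hf : (fun j : Int => ((n, (q : Int) + j - n ^ 2) : Int × Int))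
        = (fun j : Int => ((n, j) : Int × Int)) := by
      funext j
      rw [Prod.mk.injEq]
      constructor
      · rfl
      · omega
    rw [hf]
  · -- regime 1: n² ≤ N < n² + n
    rw [if_pos (by constructor <;> rw [pow_two] <;> linarith)]
    rw [Aloop_eval ((n - 1) :: desc k) (bodyA1 n ((n - 1) :: desc k)) q K hq1
      (fun i => (n - 1, n + i - n ^ 2)) (n - 1) (n - 1) 3
      (fun bowl st i hi => bodyA1_tail n _ bowl st i (by omega))
      (fun bowl st => by
        rw [show (q : Int) - 1 = n ^ 2 - 1 from by omega]
        exact bodyA1_init n _ bowl st)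
      (fun bowl s i h0 hlt => bodyA1_step n _ bowl s i h0 (by omega))]
    rw [htrace]
    have hGR := G_BR (k + 1) (by omega) 0 0
    rw [show ((k + 1 : Nat) : Int) = n from by omega] at hGR
    rw [show (0 : Int) + n - 1 = n - 1 from by ring, show (k + 1) - 1 = k from rfl] at hGR
    rw [hGR]
    have hbl : decide (N ≥ n * n + n) = false := decide_eq_false (by linarith)
    rw [hbl, if_neg (by simp), ringsLoop_BR n.toNat n rfl [] 0 0, List.nil_append]
    rw [tseq_eq_map_range, hKi]
    have hf : (fun j : Int => ((n - 1, n + ((q : Int) + j) - n ^ 2) : Int × Int))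
        = (fun j : Int => ((n - 1, n + j) : Int × Int)) := by
      funext j
      rw [Prod.mk.injEq]
      constructor
      · rfl
      · omega
    rw [hf]
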